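-- pv_equiv track=rewrite | github.com/Algebra970/ubuntu-kernel-availability-checker | check_kernel_availability.py | parse_packages_file
-- ===== SOURCE A (Python) =====
-- from typing import Dict, List, Set, Tuple, Optional
--
-- def _store_package(packages: Dict, package_info: Dict) -> None:
--     """
--     Store a parsed package entry in the packages dictionary
--
--     Args:
--         packages: Dictionary to store the package in
--         package_info: Package metadata to store
--     """
--     if package_info and 'Package' in package_info:
--         packages[package_info['Package']] = package_info
--
-- def parse_packages_file(content: str) -> Dict[str, Dict[str, any]]:
--     """
--     Parse Ubuntu Packages file content
--
--     Args:
--         content: Content of Packages file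
--
--     Returns:
--         Dictionary mapping package names to their metadata
--     """
--     packages = {}
--     current_package = {}
--
--     for line in content.split('\n'):
--         if line.strip() == '':
--             # Empty line marks end of a package entry
--             _store_package(packages, current_package)
--             current_package = {}
--         else:
--             # Parse key-value pairs
--             if ':' in line:
--                 key, value = line.split(':', 1)
--                 current_package[key.strip()] = value.strip()
--
--     # Don't forget the last package
--     _store_package(packages, current_package)
--     return packages
-- ===== SOURCE B (Python) =====
-- def parse_packages_file(content):
--     """Two-stage parse: group lines into records at blank lines, then parse each record."""
--     records = []
--     record = []
--     for line in content.split('\n'):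
--         if line.strip() == '':
--             records.append(record)
--             record = []
--         else:
--             record.append(line)
--     records.append(record)
--
--     packages = {}
--     for rec in records:
--         info = {}
--         for line in rec:
--             if ':' in line:
--                 key, value = line.split(':', 1)
--                 info[key.strip()] = value.strip()
--         if 'Package' in info:
--             packages[info['Package']] = info
--     return packages
-- ===== Notes on version B (the rewrite author's own statement) =====
-- stated objective: alternative
-- what changed: Replaces A's single stateful pass (interleaving blank-line detection, key parsing and storing via a mutable current dict) with a two-stage pipeline: first group lines into records at blank lines, then parse each record into a dict and store it.
import Mathlib
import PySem

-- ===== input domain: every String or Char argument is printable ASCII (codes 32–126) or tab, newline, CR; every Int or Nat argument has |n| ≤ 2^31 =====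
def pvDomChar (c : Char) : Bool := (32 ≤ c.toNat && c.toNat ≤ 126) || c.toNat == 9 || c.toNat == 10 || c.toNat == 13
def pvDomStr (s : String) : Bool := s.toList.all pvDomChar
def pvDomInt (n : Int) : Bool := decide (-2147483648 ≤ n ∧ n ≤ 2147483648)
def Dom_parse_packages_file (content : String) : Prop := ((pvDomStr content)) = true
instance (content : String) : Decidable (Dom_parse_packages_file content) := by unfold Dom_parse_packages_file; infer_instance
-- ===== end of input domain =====

-- B replaces A's single stateful pass by a group-lines-into-records-then-parse two-stage pipeline (alternative decomposition, same cost).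

-- ===== PORT A =====
-- _store_package: store info under its 'Package' key if info is nonempty and has one
def pvStoreA (pkgs : PySem.Dict String (PySem.Dict String String))
    (info : PySem.Dict String String) : PySem.Dict String (PySem.Dict String String) :=
  if !info.items.isEmpty && info.contains "Package" then
    pkgs.insert ((info.get? "Package").getD "") info
  else pkgs

-- one iteration of A's loop over lines; state = (packages, current_package)
def pvStepA (st : PySem.Dict String (PySem.Dict String String) × PySem.Dict String String)
    (line : String) : PySem.Dict String (PySem.Dict String String) × PySem.Dict String String :=
  if PySem.Str.strip line = "" then (pvStoreA st.1 st.2, PySem.Dict.empty)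
  else if PySem.Str.isIn ":" line then
    match PySem.Str.splitMax? line ":" 1 with
    | some (k :: v :: _) => (st.1, st.2.insert (PySem.Str.strip k) (PySem.Str.strip v))
    | _ => st
  else st

def parse_packages_file (content : String) : List (String × List (String × String)) :=
  let fin := ((PySem.Str.split? content "\n").getD []).foldl pvStepA (PySem.Dict.empty, PySem.Dict.empty)
  (pvStoreA fin.1 fin.2).items.map (fun p => (p.1, p.2.items))

-- ===== PORT B =====
-- grouping pass: state = (records, record); blank line closes the current record
def pvGStep (st : List (List String) × List String) (line : String) :
    List (List String) × List String :=
  if PySem.Str.strip line = "" then (st.1 ++ [st.2], [])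
  else (st.1, st.2 ++ [line])

-- parse one line of a record into the record's dict
def pvParseLine (info : PySem.Dict String String) (line : String) : PySem.Dict String String :=
  if PySem.Str.isIn ":" line then
    match PySem.Str.splitMax? line ":" 1 with
    | some (k :: v :: _) => info.insert (PySem.Str.strip k) (PySem.Str.strip v)
    | _ => info
  else info

-- parse a record and store it if it names a 'Package'
def pvStoreB (pkgs : PySem.Dict String (PySem.Dict String String)) (rec : List String) :
    PySem.Dict String (PySem.Dict String String) :=
  let info := rec.foldl pvParseLine PySem.Dict.empty
  if info.contains "Package" then pkgs.insert ((info.get? "Package").getD "") info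
  else pkgs

def parse_packages_file_alt (content : String) : List (String × List (String × String)) :=
  let g := ((PySem.Str.split? content "\n").getD []).foldl pvGStep ([], [])
  let pkgs := (g.1 ++ [g.2]).foldl pvStoreB PySem.Dict.empty
  pkgs.items.map (fun p => (p.1, p.2.items))

-- ===== PRECONDITION & SPEC =====
def Spec_parse_packages_file (content : String) (out : List (String × List (String × String))) : Prop := out = parse_packages_file_alt content
instance (content : String) (out : List (String × List (String × String))) : Decidable (Spec_parse_packages_file content out) := by unfold Spec_parse_packages_file; infer_instance

-- ===== CLAIM (what is proved, stated in full; the proofs are below) =====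
def Claim_equal_parse_packages_file : Prop := ∀ (content : String), Dom_parse_packages_file content → Spec_parse_packages_file content (parse_packages_file content)

-- ===== LEMMAS AND PROOFS =====

-- a dict that contains a key is nonempty
lemma pv_contains_not_empty (d : PySem.Dict String String)
    (h : d.contains "Package" = true) : d.items.isEmpty = false := by
  cases d with
  | mk its =>
    cases its with
    | nil => simp [PySem.Dict.contains, PySem.Dict.items] at h
    | cons a l => simp

-- A's final store of the parsed current record = B's store of the raw record
lemma pv_store_eq (pkgs : PySem.Dict String (PySem.Dict String String)) (rec : List String) :
    pvStoreA pkgs (rec.foldl pvParseLine PySem.Dict.empty) = pvStoreB pkgs rec := by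
  unfold pvStoreA pvStoreB
  by_cases h : (rec.foldl pvParseLine PySem.Dict.empty).contains "Package" = true
  · simp [h, pv_contains_not_empty _ h]
  · simp [h]

-- on a non-blank line, A's step leaves packages alone and parses the line
lemma pv_stepA_nonblank (st : PySem.Dict String (PySem.Dict String String) × PySem.Dict String String)
    (line : String) (h : ¬ PySem.Str.strip line = "") :
    pvStepA st line = (st.1, pvParseLine st.2 line) := by
  unfold pvStepA pvParseLine
  simp only [h, if_false]
  by_cases hc : PySem.Str.isIn ":" line = true
  · simp only [hc, if_true]
    cases PySem.Str.splitMax? line ":" 1 with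
    | none => rfl
    | some ps =>
      cases ps with
      | nil => rfl
      | cons k rest => cases rest with
        | nil => rfl
        | cons v r => rfl
  · simp at hc
    simp [hc]

-- the grouping fold's accumulated records are a state prefix
lemma pv_gfold_prefix (lines : List String) :
    ∀ (recs : List (List String)) (rec : List String),
    lines.foldl pvGStep (recs, rec) =
      (recs ++ (lines.foldl pvGStep ([], rec)).1, (lines.foldl pvGStep ([], rec)).2) := by
  induction lines with
  | nil => intro recs rec; simp
  | cons l ls ih =>
    intro recs rec
    by_cases h : PySem.Str.strip l = ""
    · simp only [List.foldl_cons, pvGStep, h, if_true]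
      rw [ih (recs ++ [rec]) [], ih ([] ++ [rec]) []]
      simp
    · simp only [List.foldl_cons, pvGStep, h, if_false]
      exact ih recs (rec ++ [l])

-- main invariant: A's fold-then-store equals B's store of every grouped record
lemma pv_main (lines : List String) :
    ∀ (pkgs : PySem.Dict String (PySem.Dict String String)) (rec : List String),
    (let f := lines.foldl pvStepA (pkgs, rec.foldl pvParseLine PySem.Dict.empty)
     pvStoreA f.1 f.2) =
    ((lines.foldl pvGStep ([], rec)).1 ++ [(lines.foldl pvGStep ([], rec)).2]).foldl pvStoreB pkgs := by
  induction lines with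
  | nil =>
    intro pkgs rec
    simpa using pv_store_eq pkgs rec
  | cons l ls ih =>
    intro pkgs rec
    by_cases h : PySem.Str.strip l = ""
    · simp only [List.foldl_cons]
      have hstep : pvStepA (pkgs, rec.foldl pvParseLine PySem.Dict.empty) l =
          (pvStoreA pkgs (rec.foldl pvParseLine PySem.Dict.empty), PySem.Dict.empty) := by
        simp [pvStepA, h]
      rw [hstep, pv_store_eq]
      have hg : pvGStep ([], rec) l = ([rec], []) := by simp [pvGStep, h]
      rw [hg, pv_gfold_prefix ls [rec] []]
      have := ih (pvStoreB pkgs rec) []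
      simp only [List.foldl_nil] at this
      simp only [List.cons_append, List.foldl_cons]
      simpa using this
    · simp only [List.foldl_cons]
      rw [pv_stepA_nonblank _ _ h]
      have hg : pvGStep ([], rec) l = ([], rec ++ [l]) := by simp [pvGStep, h]
      rw [hg]
      have := ih pkgs (rec ++ [l])
      simpa using this

-- ===== VERDICT (by name: the statement is the Claim_ definition above) =====
theorem parse_packages_file_spec : Claim_equal_parse_packages_file := by
  intro content _
  unfold Spec_parse_packages_file parse_packages_file parse_packages_file_alt
  have := pv_main ((PySem.Str.split? content "\n").getD []) PySem.Dict.empty []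
  simp only [List.foldl_nil] at this
  simp only [this]
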